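-- pv_equiv track=rewrite | github.com/JanPecka/AdventOfCode2020 | day16/day16.py | find_possible_positions
-- ===== SOURCE A (Python) =====
-- def find_possible_positions(vals_per_p, allowed_vals):
--     poss_pos = {}
--     for key, allowed_vals in allowed_vals.items():
--         poss_pos[key] = {
--             i for i, all_vals in enumerate(vals_per_p)
--             if not all_vals - allowed_vals  # No unallowed values.
--             }
--     return poss_pos
-- ===== SOURCE B (Python) =====
-- def find_possible_positions(vals_per_p, allowed_vals):
--     # Inverted index: value -> set of keys whose allowed set contains it.
--     value_to_keys = {}
--     for key, av in allowed_vals.items():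
--         for v in av:
--             value_to_keys.setdefault(v, set()).add(key)
--     poss_pos = {key: set() for key in allowed_vals}
--     for i, s in enumerate(vals_per_p):
--         if not s:
--             keys = set(poss_pos)
--         else:
--             it = iter(s)
--             keys = set(value_to_keys.get(next(it), set()))
--             for v in it:
--                 keys &= value_to_keys.get(v, set())
--         for key in keys:
--             poss_pos[key].add(i)
--     return poss_pos
-- ===== Notes on version B (the rewrite author's own statement) =====
-- stated objective: faster
-- what changed: Replaces A's per-(key, position) subset tests by an inverted index mapping each allowed value to the set of keys allowing it; each position's matching keys are then found by intersecting index entries (empty value-sets match all keys) and the position is appended to every matching key's pre-seeded set.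
import Mathlib
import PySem

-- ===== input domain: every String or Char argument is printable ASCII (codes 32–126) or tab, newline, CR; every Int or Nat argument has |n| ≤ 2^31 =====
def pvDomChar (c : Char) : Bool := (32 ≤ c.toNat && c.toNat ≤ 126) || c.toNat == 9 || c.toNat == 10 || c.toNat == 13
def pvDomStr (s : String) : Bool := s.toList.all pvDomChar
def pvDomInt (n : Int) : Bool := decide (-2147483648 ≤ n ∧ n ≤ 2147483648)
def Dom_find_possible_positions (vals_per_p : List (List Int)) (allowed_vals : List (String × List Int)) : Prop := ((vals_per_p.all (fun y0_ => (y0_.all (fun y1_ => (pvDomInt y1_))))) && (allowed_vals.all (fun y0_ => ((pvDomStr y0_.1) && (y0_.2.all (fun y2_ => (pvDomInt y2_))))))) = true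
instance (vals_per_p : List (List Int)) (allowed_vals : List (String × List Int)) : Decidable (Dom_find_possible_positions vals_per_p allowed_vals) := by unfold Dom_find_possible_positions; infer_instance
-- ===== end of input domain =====

-- B replaces A's per-(key, position) subset tests by an inverted index value→keys plus a
-- per-position key-set intersection (measured faster in a timing run), same exact result.

-- ===== PORT A =====
-- for key, allowed in allowed_vals.items(): poss_pos[key] = {i for i, all_vals in enumerate(vals_per_p) if not all_vals - allowed}
def find_possible_positions (vals_per_p : List (List Int)) (allowed_vals : List (String × List Int)) : List (String × List Int) :=
  (allowed_vals.foldl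
    (fun poss kv =>
      poss.insert kv.1
        ((PySem.List.enumerate vals_per_p).foldl
          (fun s p => if PySem.Set.diff p.2 kv.2 = [] then PySem.Set.add s p.1 else s)
          PySem.Set.empty))
    PySem.Dict.empty).items

-- ===== PORT B =====
-- value_to_keys: for key, av in allowed_vals.items(): for v in av: value_to_keys.setdefault(v, set()).add(key)
def fpp_value_to_keys (allowed_vals : List (String × List Int)) : PySem.Dict Int (List String) :=
  allowed_vals.foldl
    (fun d kv => kv.2.foldl
      (fun d v => d.modify v PySem.Set.empty (fun ks => PySem.Set.add ks kv.1)) d)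
    PySem.Dict.empty

-- keys matching one position: all keys for an empty value set, else the intersection of value_to_keys.get(v, set())
def fpp_keys_for (v2k : PySem.Dict Int (List String)) (allKeys : List String) (s : List Int) : List String :=
  match s with
  | [] => allKeys
  | v :: rest =>
      rest.foldl (fun ks w => ks.filter (fun k => PySem.Set.contains (v2k.getD w PySem.Set.empty) k))
        (v2k.getD v PySem.Set.empty)

def find_possible_positions_alt (vals_per_p : List (List Int)) (allowed_vals : List (String × List Int)) : List (String × List Int) :=
  let v2k := fpp_value_to_keys allowed_vals
  let init : PySem.Dict String (List Int) :=
    allowed_vals.foldl (fun d kv => d.insert kv.1 PySem.Set.empty) PySem.Dict.empty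
  ((PySem.List.enumerate vals_per_p).foldl
    (fun poss p =>
      (fpp_keys_for v2k poss.keys p.2).foldl
        (fun poss k => poss.modify k PySem.Set.empty (fun s => PySem.Set.add s p.1))
        poss)
    init).items

-- ===== PRECONDITION & SPEC =====
-- allowed_vals encodes a Python dict, whose keys are necessarily distinct; Pre_ only rules out
-- association lists that encode no dict (duplicate keys) — no actual Python input is excluded.
def Pre_find_possible_positions (vals_per_p : List (List Int)) (allowed_vals : List (String × List Int)) : Prop :=
  (allowed_vals.map Prod.fst).Nodup
instance (vals_per_p : List (List Int)) (allowed_vals : List (String × List Int)) : Decidable (Pre_find_possible_positions vals_per_p allowed_vals) := by unfold Pre_find_possible_positions; infer_instance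

def pvWitness_find_possible_positions : List (List Int) × (List (String × List Int)) :=
  ([[1], [3], []], [("a", [1, 2]), ("b", [3])])

def Spec_find_possible_positions (vals_per_p : List (List Int)) (allowed_vals : List (String × List Int)) (out : List (String × List Int)) : Prop := out = find_possible_positions_alt vals_per_p allowed_vals
instance (vals_per_p : List (List Int)) (allowed_vals : List (String × List Int)) (out : List (String × List Int)) : Decidable (Spec_find_possible_positions vals_per_p allowed_vals out) := by unfold Spec_find_possible_positions; infer_instance

-- ===== CLAIM (what is proved, stated in full; the proofs are below) =====
def Claim_equal_find_possible_positions : Prop := ∀ (vals_per_p : List (List Int)) (allowed_vals : List (String × List Int)), Dom_find_possible_positions vals_per_p allowed_vals → Pre_find_possible_positions vals_per_p allowed_vals → Spec_find_possible_positions vals_per_p allowed_vals (find_possible_positions vals_per_p allowed_vals)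

-- ===== LEMMAS AND PROOFS =====

-- `not (all_vals - allowed)` is the subset test
lemma fpp_diff_eq_nil_iff (s t : List Int) : PySem.Set.diff s t = [] ↔ ∀ v ∈ s, v ∈ t := by
  simp [PySem.Set.diff, List.filter_eq_nil_iff]

-- inner loop of the index build, as one getD equation
lemma fpp_v2k_inner_getD (key : String) (ws : List Int) (d : PySem.Dict Int (List String)) (v : Int) :
    (ws.foldl (fun d w => d.modify w PySem.Set.empty (fun ks => PySem.Set.add ks key)) d).getD v PySem.Set.empty
    = if v ∈ ws then PySem.Set.add (d.getD v PySem.Set.empty) key else d.getD v PySem.Set.empty := by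
  induction ws generalizing d with
  | nil => simp
  | cons w ws ih =>
      simp only [List.foldl_cons, ih, PySem.Dict.getD_modify, List.mem_cons]
      by_cases hvw : v = w <;> by_cases hvs : v ∈ ws <;>
        simp [hvw, hvs, PySem.Set.add_of_mem, PySem.Set.mem_add]

-- membership in the inverted index
lemma fpp_v2k_getD_mem (l : List (String × List Int)) (d : PySem.Dict Int (List String)) (v : Int) (k : String) :
    (k ∈ (l.foldl (fun d kv => kv.2.foldl
        (fun d w => d.modify w PySem.Set.empty (fun ks => PySem.Set.add ks kv.1)) d) d).getD v PySem.Set.empty)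
    ↔ k ∈ d.getD v PySem.Set.empty ∨ ∃ kv ∈ l, kv.1 = k ∧ v ∈ kv.2 := by
  induction l generalizing d with
  | nil => simp
  | cons kv l ih =>
      simp only [List.foldl_cons, ih, fpp_v2k_inner_getD]
      by_cases hv : v ∈ kv.2 <;> simp [hv, PySem.Set.mem_add]; tauto

-- index entries are duplicate-free
lemma fpp_v2k_getD_nodup (l : List (String × List Int)) (d : PySem.Dict Int (List String))
    (hd : ∀ v, (d.getD v PySem.Set.empty).Nodup) (v : Int) :
    ((l.foldl (fun d kv => kv.2.foldl
        (fun d w => d.modify w PySem.Set.empty (fun ks => PySem.Set.add ks kv.1)) d) d).getD v PySem.Set.empty).Nodup := by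
  induction l generalizing d with
  | nil => exact hd v
  | cons kv l ih =>
      refine ih _ (fun w => ?_)
      rw [fpp_v2k_inner_getD]
      split
      · exact PySem.Set.nodup_add _ _ (hd w)
      · exact hd w

-- the intersection loop, as a membership characterisation
lemma fpp_inter_fold_mem (v2k : PySem.Dict Int (List String)) (rest : List Int) (base : List String) (k : String) :
    (k ∈ rest.foldl (fun ks w => ks.filter (fun k => PySem.Set.contains (v2k.getD w PySem.Set.empty) k)) base)
    ↔ k ∈ base ∧ ∀ w ∈ rest, k ∈ v2k.getD w PySem.Set.empty := by
  induction rest generalizing base with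
  | nil => simp
  | cons w rest ih =>
      simp only [List.foldl_cons, ih, List.mem_filter, PySem.Set.contains_iff, List.mem_cons]
      constructor
      · rintro ⟨⟨h1, h2⟩, h3⟩
        exact ⟨h1, fun w' hw' => by rcases hw' with rfl | hw' <;> [exact h2; exact h3 w' hw']⟩
      · rintro ⟨h1, h2⟩
        exact ⟨⟨h1, h2 w (Or.inl rfl)⟩, fun w' hw' => h2 w' (Or.inr hw')⟩

lemma fpp_inter_fold_nodup (v2k : PySem.Dict Int (List String)) (rest : List Int) (base : List String)
    (hb : base.Nodup) :
    (rest.foldl (fun ks w => ks.filter (fun k => PySem.Set.contains (v2k.getD w PySem.Set.empty) k)) base).Nodup := by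
  induction rest generalizing base with
  | nil => exact hb
  | cons w rest ih => exact ih _ (hb.filter _)

-- with distinct keys, a member kv of the list is the unique entry for its key
lemma fpp_key_unique (A : List (String × List Int)) (hnd : (A.map Prod.fst).Nodup)
    {kv kv' : String × List Int} (h1 : kv ∈ A) (h2 : kv' ∈ A) (h : kv'.1 = kv.1) : kv' = kv :=
  List.inj_on_of_nodup_map hnd h2 h1 h

-- the key list computed for one position is exactly { key | S ⊆ allowed(key) }
lemma fpp_keys_for_mem (A : List (String × List Int)) (hnd : (A.map Prod.fst).Nodup)
    {kv : String × List Int} (hkv : kv ∈ A) (S : List Int) :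
    (kv.1 ∈ fpp_keys_for (fpp_value_to_keys A) (A.map Prod.fst) S) ↔ ∀ v ∈ S, v ∈ kv.2 := by
  cases S with
  | nil =>
      simp only [fpp_keys_for, List.mem_map]
      exact ⟨fun _ => by simp, fun _ => ⟨kv, hkv, rfl⟩⟩
  | cons v rest =>
      simp only [fpp_keys_for, fpp_inter_fold_mem, fpp_value_to_keys, fpp_v2k_getD_mem,
        PySem.Dict.getD_empty, List.mem_cons]
      constructor
      · rintro ⟨h1, h2⟩ w hw
        rcases hw with rfl | hw
        · rcases h1 with h1 | ⟨kv', hkv', hk, hv⟩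
          · simp [PySem.Set.empty] at h1
          · rwa [fpp_key_unique A hnd hkv hkv' hk] at hv
        · rcases h2 w hw with h1 | ⟨kv', hkv', hk, hv⟩
          · simp [PySem.Set.empty] at h1
          · rwa [fpp_key_unique A hnd hkv hkv' hk] at hv
      · intro h
        exact ⟨Or.inr ⟨kv, hkv, rfl, h v (Or.inl rfl)⟩,
          fun w hw => Or.inr ⟨kv, hkv, rfl, h w (Or.inr hw)⟩⟩

lemma fpp_keys_for_nodup (A : List (String × List Int)) (hnd : (A.map Prod.fst).Nodup) (S : List Int) :
    (fpp_keys_for (fpp_value_to_keys A) (A.map Prod.fst) S).Nodup := by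
  cases S with
  | nil => exact hnd
  | cons v rest =>
      exact fpp_inter_fold_nodup _ _ _
        (fpp_v2k_getD_nodup A PySem.Dict.empty (fun _ => by simp) v)

lemma fpp_keys_for_sub (A : List (String × List Int)) (S : List Int)
    {k : String} (hk : k ∈ fpp_keys_for (fpp_value_to_keys A) (A.map Prod.fst) S) :
    k ∈ A.map Prod.fst := by
  cases S with
  | nil => exact hk
  | cons v rest =>
      rcases (fpp_inter_fold_mem _ _ _ _).1 hk with ⟨h1, -⟩
      rcases (fpp_v2k_getD_mem A PySem.Dict.empty v k).1 h1 with h | ⟨kv, hkv, hk1, -⟩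
      · simp [PySem.Set.empty] at h
      · exact List.mem_map.2 ⟨kv, hkv, hk1⟩

-- a single modify on a dict in map form, keys distinct
lemma fpp_modify_map_form (A : List (String × List Int)) (hnd : (A.map Prod.fst).Nodup)
    (g : String × List Int → List Int) (k : String) (hk : k ∈ A.map Prod.fst) (f : List Int → List Int) :
    (PySem.Dict.mk (A.map (fun kv => (kv.1, g kv)))).modify k PySem.Set.empty f
    = PySem.Dict.mk (A.map (fun kv => (kv.1, if kv.1 = k then f (g kv) else g kv))) := by
  rcases List.mem_map.1 hk with ⟨kv0, hkv0, hk0⟩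
  have hkeys : (PySem.Dict.mk (A.map (fun kv => (kv.1, g kv)))).keys = A.map Prod.fst := by
    simp [PySem.Dict.keys_mk, List.map_map]
  have hkeysnd : (PySem.Dict.mk (A.map (fun kv => (kv.1, g kv)))).keys.Nodup := by
    rw [hkeys]; exact hnd
  have hmem : (k, g kv0) ∈ (PySem.Dict.mk (A.map (fun kv => (kv.1, g kv)))).items := by
    rw [← hk0]; exact List.mem_map.2 ⟨kv0, hkv0, rfl⟩
  have hget : (PySem.Dict.mk (A.map (fun kv => (kv.1, g kv)))).getD k PySem.Set.empty = g kv0 :=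
    PySem.Dict.getD_of_mem_items _ hmem hkeysnd _
  have hcont : (PySem.Dict.mk (A.map (fun kv => (kv.1, g kv)))).contains k = true := by
    rw [PySem.Dict.contains_iff_mem_keys, hkeys]; exact hk
  apply PySem.Dict.ext
  simp only [PySem.Dict.modify, hget]
  rw [PySem.Dict.items_insert_of_contains _ _ hcont]
  show (A.map (fun kv => (kv.1, g kv))).map (fun p => if p.1 == k then (k, f (g kv0)) else p) = _
  rw [List.map_map]
  apply List.map_congr_left
  intro kv hkv
  by_cases h : kv.1 = k
  · have : kv = kv0 := fpp_key_unique A hnd hkv0 hkv (h.trans hk0.symm)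
    simp [Function.comp, this, ← hk0]
  · simp [Function.comp, h]

-- the append-to-every-matching-key loop, keys distinct and drawn from the dict
lemma fpp_modify_fold_map_form (A : List (String × List Int)) (hnd : (A.map Prod.fst).Nodup)
    (K : List String) (hK : K.Nodup) (hsub : ∀ k ∈ K, k ∈ A.map Prod.fst)
    (g : String × List Int → List Int) (f : List Int → List Int) :
    K.foldl (fun d k => d.modify k PySem.Set.empty f) (PySem.Dict.mk (A.map (fun kv => (kv.1, g kv))))
    = PySem.Dict.mk (A.map (fun kv => (kv.1, if kv.1 ∈ K then f (g kv) else g kv))) := by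
  induction K generalizing g with
  | nil => simp
  | cons k K ih =>
      rw [List.foldl_cons, fpp_modify_map_form A hnd g k (hsub k (by simp)) f,
        ih hK.of_cons (fun k' hk' => hsub k' (by simp [hk'])) ]
      congr 1
      apply List.map_congr_left
      intro kv hkv
      by_cases h : kv.1 = k
      · have hkK : k ∉ K := (List.nodup_cons.1 hK).1
        simp [h, hkK]
      · simp [h, List.mem_cons]

-- the whole position loop, in map form
lemma fpp_b_loop (A : List (String × List Int)) (hnd : (A.map Prod.fst).Nodup)
    (es : List (Int × List Int)) (g : String × List Int → List Int) :
    es.foldl (fun poss p =>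
        (fpp_keys_for (fpp_value_to_keys A) poss.keys p.2).foldl
          (fun poss k => poss.modify k PySem.Set.empty (fun s => PySem.Set.add s p.1)) poss)
      (PySem.Dict.mk (A.map (fun kv => (kv.1, g kv))))
    = PySem.Dict.mk (A.map (fun kv => (kv.1,
        es.foldl (fun s p => if PySem.Set.diff p.2 kv.2 = [] then PySem.Set.add s p.1 else s) (g kv)))) := by
  induction es generalizing g with
  | nil => rfl
  | cons p es ih =>
      rw [List.foldl_cons]
      have hkeys : (PySem.Dict.mk (A.map (fun kv => (kv.1, g kv)))).keys = A.map Prod.fst := by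
        simp [PySem.Dict.keys_mk, List.map_map]
      rw [hkeys,
        fpp_modify_fold_map_form A hnd _ (fpp_keys_for_nodup A hnd p.2)
          (fun k hk => fpp_keys_for_sub A p.2 hk) g (fun s => PySem.Set.add s p.1)]
      have hmap : (A.map (fun kv => (kv.1,
          if kv.1 ∈ fpp_keys_for (fpp_value_to_keys A) (A.map Prod.fst) p.2
          then PySem.Set.add (g kv) p.1 else g kv)))
          = A.map (fun kv => (kv.1,
          if PySem.Set.diff p.2 kv.2 = [] then PySem.Set.add (g kv) p.1 else g kv)) := by
        apply List.map_congr_left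
        intro kv hkv
        have h := (fpp_keys_for_mem A hnd hkv p.2).trans (fpp_diff_eq_nil_iff p.2 kv.2).symm
        by_cases hc : PySem.Set.diff p.2 kv.2 = []
        · simp [hc, h.2 hc]
        · have hm : kv.1 ∉ fpp_keys_for (fpp_value_to_keys A) (A.map Prod.fst) p.2 :=
            fun hm => hc (h.1 hm)
          simp [hc, hm]
      rw [hmap, ih (fun kv => if PySem.Set.diff p.2 kv.2 = [] then PySem.Set.add (g kv) p.1 else g kv)]
      simp only [List.foldl_cons]

-- A's dict in map form
lemma fpp_a_items (vals_per_p : List (List Int)) (A : List (String × List Int)) (hnd : (A.map Prod.fst).Nodup) :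
    find_possible_positions vals_per_p A
    = A.map (fun kv => (kv.1,
        (PySem.List.enumerate vals_per_p).foldl
          (fun s p => if PySem.Set.diff p.2 kv.2 = [] then PySem.Set.add s p.1 else s) PySem.Set.empty)) := by
  unfold find_possible_positions
  rw [PySem.Dict.items_foldl_insert_fresh A Prod.fst
    (fun kv => (PySem.List.enumerate vals_per_p).foldl
      (fun s p => if PySem.Set.diff p.2 kv.2 = [] then PySem.Set.add s p.1 else s) PySem.Set.empty)
    PySem.Dict.empty (fun a _ => by simp) hnd]
  simp [PySem.Dict.empty]

-- B's seed dict in map form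
lemma fpp_init_eq (A : List (String × List Int)) (hnd : (A.map Prod.fst).Nodup) :
    (A.foldl (fun d kv => d.insert kv.1 PySem.Set.empty) PySem.Dict.empty : PySem.Dict String (List Int))
    = PySem.Dict.mk (A.map (fun kv => (kv.1, PySem.Set.empty))) := by
  apply PySem.Dict.ext
  rw [PySem.Dict.items_foldl_insert_fresh A Prod.fst (fun _ => PySem.Set.empty)
    PySem.Dict.empty (fun a _ => by simp) hnd]
  simp [PySem.Dict.empty]

-- ===== VERDICT (by name: the statement is the Claim_ definition above) =====
theorem find_possible_positions_spec : Claim_equal_find_possible_positions := by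
  intro vals_per_p A _ hnd
  unfold Spec_find_possible_positions find_possible_positions_alt
  show find_possible_positions vals_per_p A =
    ((PySem.List.enumerate vals_per_p).foldl
      (fun poss p =>
        (fpp_keys_for (fpp_value_to_keys A) poss.keys p.2).foldl
          (fun poss k => poss.modify k PySem.Set.empty (fun s => PySem.Set.add s p.1)) poss)
      (A.foldl (fun d kv => d.insert kv.1 PySem.Set.empty) PySem.Dict.empty)).items
  rw [fpp_a_items vals_per_p A hnd, fpp_init_eq A hnd,
    fpp_b_loop A hnd (PySem.List.enumerate vals_per_p) (fun _ => PySem.Set.empty)]
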